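-- pv_equiv track=rewrite | github.com/toussaintma/adventofcode2023 | 12/run2.py | check_arrangement
-- ===== SOURCE A (Python) =====
-- def check_arrangement(arr, infor):
--   result = True
--   s = list(filter(lambda x: len(x) != 0, arr.split('.')))
--   if len(s) != len(infor):
--     result = False
--   else:
--     for g in range(len(s)):
--       if len(s[g]) != infor[g]:
--         result = False
--   return result
-- ===== SOURCE B (Python) =====
-- def check_arrangement(arr, infor):
--     i = 0
--     run = 0
--     ok = True
--     for c in arr:
--         if c == '.':
--             if run != 0:
--                 if not (i < len(infor) and infor[i] == run):
--                     ok = False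
--                 i += 1
--                 run = 0
--         else:
--             run += 1
--     if run != 0:
--         if not (i < len(infor) and infor[i] == run):
--             ok = False
--         i += 1
--     return ok and i == len(infor)
-- ===== Notes on version B (the rewrite author's own statement) =====
-- stated objective: simpler
-- what changed: Replaces split('.')+filter+length-check+indexed loop over two lists by a single left-to-right character scan keeping only a run-length counter and an index into infor, with no intermediate list of segments.
import Mathlib
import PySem

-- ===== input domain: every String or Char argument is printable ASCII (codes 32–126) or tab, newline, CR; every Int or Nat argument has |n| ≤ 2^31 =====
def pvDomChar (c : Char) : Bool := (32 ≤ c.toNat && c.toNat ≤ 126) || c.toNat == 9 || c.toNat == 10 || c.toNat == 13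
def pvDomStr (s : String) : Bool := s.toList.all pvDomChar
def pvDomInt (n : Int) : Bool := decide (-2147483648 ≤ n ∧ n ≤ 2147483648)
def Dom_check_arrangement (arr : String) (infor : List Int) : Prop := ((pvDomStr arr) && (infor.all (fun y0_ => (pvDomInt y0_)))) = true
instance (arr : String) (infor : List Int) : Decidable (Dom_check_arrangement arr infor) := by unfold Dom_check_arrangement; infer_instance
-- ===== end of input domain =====

-- B replaces split+filter+indexed loop by a single character scan with a run counter
-- and an index into infor (objective: simpler one-pass decomposition, no intermediate lists).

-- ===== PORT A =====
def check_arrangement (arr : String) (infor : List Int) : Bool :=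
  let result := true
  let s := (PySem.Chars.splitOn arr.toList ['.']).filter (fun x => x.length != 0)
  if (s.length : Int) ≠ (infor.length : Int) then false
  else
    (PySem.List.pyRange 0 (s.length : Int) 1).foldl
      (fun result g =>
        if ((PySem.List.pyGetD s g []).length : Int) ≠ PySem.List.pyGetD infor g 0 then false
        else result)
      result

-- ===== PORT B =====
-- state: (index into infor, current run length, ok so far)
def stepB (infor : List Int) (st : Nat × Nat × Bool) (c : Char) : Nat × Nat × Bool :=
  if c = '.' then
    if st.2.1 ≠ 0 then
      (st.1 + 1, 0,
        if st.1 < infor.length ∧ infor.getD st.1 0 = (st.2.1 : Int) then st.2.2 else false)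
    else st
  else (st.1, st.2.1 + 1, st.2.2)

def finishB (infor : List Int) (st : Nat × Nat × Bool) : Bool :=
  if st.2.1 ≠ 0 then
    (if st.1 < infor.length ∧ infor.getD st.1 0 = (st.2.1 : Int) then st.2.2 else false)
      && decide (st.1 + 1 = infor.length)
  else st.2.2 && decide (st.1 = infor.length)

def check_arrangement_alt (arr : String) (infor : List Int) : Bool :=
  finishB infor (arr.toList.foldl (stepB infor) (0, 0, true))

-- ===== PRECONDITION & SPEC =====
def Spec_check_arrangement (arr : String) (infor : List Int) (out : Bool) : Prop := out = check_arrangement_alt arr infor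
instance (arr : String) (infor : List Int) (out : Bool) : Decidable (Spec_check_arrangement arr infor out) := by unfold Spec_check_arrangement; infer_instance

-- ===== CLAIM (what is proved, stated in full; the proofs are below) =====
def Claim_equal_check_arrangement : Prop := ∀ (arr : String) (infor : List Int), Dom_check_arrangement arr infor → Spec_check_arrangement arr infor (check_arrangement arr infor)

-- ===== LEMMAS AND PROOFS =====

-- proof-only helper: structural version of split('.')
def splitD (cur : List Char) : List Char → List (List Char)
  | [] => [cur.reverse]
  | c :: rest => if c = '.' then cur.reverse :: splitD [] rest else splitD (c :: cur) rest

-- proof-only helper: lengths of the non-empty runs, with run the length of the open run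
def groupsAux (run : Nat) : List Char → List Nat
  | [] => if run = 0 then [] else [run]
  | c :: rest =>
      if c = '.' then (if run = 0 then groupsAux 0 rest else run :: groupsAux 0 rest)
      else groupsAux (run + 1) rest

theorem go_dot (l : List Char) : ∀ (fuel : Nat) (cur : List Char) (acc : List (List Char)),
    l.length < fuel →
    PySem.Chars.splitOn.go ['.'] fuel l cur acc = acc.reverse ++ splitD cur l := by
  induction l with
  | nil =>
      intro fuel cur acc h
      match fuel, h with
      | fuel + 1, _ =>
        rw [PySem.Chars.splitOn.go.eq_def]
        simp [splitD]
  | cons c rest ih =>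
      intro fuel cur acc h
      match fuel, h with
      | fuel + 1, h =>
        rw [PySem.Chars.splitOn.go.eq_def]
        simp only [List.isPrefixOf, Bool.and_true]
        by_cases hc : c = '.'
        · subst hc
          simp only [beq_self_eq_true, if_pos]
          have hd : List.drop ['.'].length ('.' :: rest) = rest := by simp
          rw [hd, ih fuel [] (cur.reverse :: acc) (by simpa using Nat.lt_of_succ_lt_succ h)]
          simp [splitD]
        · have : ('.' == c) = false := by simp [BEq.beq]; exact fun e => hc e.symm
          simp only [this, Bool.false_eq_true, if_false]
          rw [ih fuel (c :: cur) acc (Nat.lt_of_succ_lt_succ h)]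
          simp [splitD, hc]

theorem splitOn_eq_splitD (l : List Char) :
    PySem.Chars.splitOn l ['.'] = splitD [] l := by
  show PySem.Chars.splitOn.go ['.'] (l.length + 1) l [] [] = _
  rw [go_dot l (l.length + 1) [] [] (Nat.lt_succ_self _)]
  simp

theorem filter_splitD (l : List Char) : ∀ (cur : List Char),
    ((splitD cur l).filter (fun x => x.length != 0)).map (fun x => (x.length : Int))
      = (groupsAux cur.length l).map Int.ofNat := by
  induction l with
  | nil =>
      intro cur
      by_cases h : cur = [] <;> simp [splitD, groupsAux, h, List.length_eq_zero_iff]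
  | cons c rest ih =>
      intro cur
      by_cases hc : c = '.'
      · subst hc
        by_cases h : cur = []
        · simp [splitD, groupsAux, h, ih]
        · have hl : cur.length ≠ 0 := by simpa [List.length_eq_zero_iff] using h
          simp [splitD, groupsAux, hl, ih]
      · have := ih (c :: cur)
        simp only [splitD, groupsAux, if_neg hc]
        simpa using this

theorem loopAux (xs : List (List Char)) : ∀ (ys : List Int) (r : Bool),
    xs.length = ys.length →
    (List.range xs.length).foldl
        (fun r k => if ((xs.getD k []).length : Int) ≠ ys.getD k 0 then false else r) r
      = (r && decide (xs.map (fun x => (x.length : Int)) = ys)) := by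
  induction xs with
  | nil => intro ys r h; cases ys with
      | nil => simp
      | cons y ys => simp at h
  | cons x xs ih =>
      intro ys r h
      cases ys with
      | nil => simp at h
      | cons y ys =>
        have hlen : xs.length = ys.length := by simpa using h
        simp only [List.length_cons]
        rw [List.range_succ_eq_map]
        simp only [List.foldl_cons, List.foldl_map, List.getD_cons_succ, List.getD_cons_zero]
        rw [ih ys _ hlen]
        by_cases hx : ((x.length : Int) = y) <;>
          by_cases ht : (xs.map (fun x => (x.length : Int)) = ys) <;>
          simp [hx, ht]

theorem check_arrangement_eq_decide (arr : String) (infor : List Int) :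
    check_arrangement arr infor
      = decide (((splitD [] arr.toList).filter (fun x => x.length != 0)).map
          (fun x => (x.length : Int)) = infor) := by
  unfold check_arrangement
  rw [splitOn_eq_splitD]
  set s := (splitD [] arr.toList).filter (fun x => x.length != 0) with hs
  by_cases h : s.length = infor.length
  · have hInt : ¬ ((s.length : Int) ≠ (infor.length : Int)) := by simp [h]
    rw [if_neg hInt, PySem.List.pyRange_zero_nat, List.foldl_map]
    simp only [PySem.List.pyGetD_natCast]
    rw [loopAux s infor true h]
    simp
  · have : s.map (fun x => (x.length : Int)) ≠ infor := by
      intro e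
      have := congrArg List.length e
      simp at this; exact h this
    simp [h, this]

theorem drop_cons_iff (ys : List Int) : ∀ (i : Nat) (a : Int) (t : List Int),
    ys.drop i = a :: t ↔ i < ys.length ∧ ys.getD i 0 = a ∧ ys.drop (i + 1) = t := by
  induction ys with
  | nil => intro i a t; simp
  | cons y ys ih =>
      intro i a t
      cases i with
      | zero => simp
      | succ i => simpa using ih i a t

theorem foldB_false (infor : List Int) (l : List Char) : ∀ (i run : Nat),
    finishB infor (l.foldl (stepB infor) (i, run, false)) = false := by
  induction l with
  | nil => intro i run; by_cases h : run = 0 <;> simp [finishB, h]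
  | cons c rest ih =>
      intro i run
      by_cases hc : c = '.'
      · by_cases h : run = 0 <;>
          simp [stepB, hc, h, List.foldl_cons, ih]
      · simpa [stepB, hc] using ih i (run + 1)

theorem foldB_true (infor : List Int) (l : List Char) : ∀ (i run : Nat), i ≤ infor.length →
    finishB infor (l.foldl (stepB infor) (i, run, true))
      = decide (infor.drop i = (groupsAux run l).map Int.ofNat) := by
  induction l with
  | nil =>
      intro i run hi
      show finishB infor (i, run, true) = _
      unfold finishB groupsAux
      by_cases h : run = 0
      · have e1 : List.drop i infor = [] ↔ i = infor.length := by
          rw [List.drop_eq_nil_iff]; omega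
        simp [h, e1]
      · by_cases hcond : i < infor.length ∧ infor.getD i 0 = (run : Int)
        · have e1 : (List.drop i infor = List.map Int.ofNat [run]) ↔ (i + 1 = infor.length) := by
            rw [List.map_cons, List.map_nil, drop_cons_iff, List.drop_eq_nil_iff]
            constructor
            · rintro ⟨h1, _, h2⟩; omega
            · intro e; exact ⟨by omega, hcond.2, by omega⟩
          simp only [h, if_false, ne_eq, not_false_eq_true, if_true, if_pos hcond, Bool.true_and]
          rw [eq_comm]
          rw [decide_eq_decide.mpr e1]
        · have e1 : ¬ (List.drop i infor = List.map Int.ofNat [run]) := by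
            rw [List.map_cons, List.map_nil, drop_cons_iff]
            rintro ⟨h1, h2, _⟩; exact hcond ⟨h1, h2⟩
          simp only [h, if_false, ne_eq, not_false_eq_true, if_true, if_neg hcond, Bool.false_and]
          rw [eq_comm, decide_eq_false_iff_not]
          exact e1
  | cons c rest ih =>
      intro i run hi
      by_cases hc : c = '.'
      · by_cases h : run = 0
        · have hstep : stepB infor (i, run, true) c = (i, run, true) := by
            simp [stepB, hc, h]
          rw [List.foldl_cons, hstep, ih i run hi]
          subst h; simp [groupsAux, hc]
        · by_cases hcond : i < infor.length ∧ infor.getD i 0 = (run : Int)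
          · have hstep : stepB infor (i, run, true) c = (i + 1, 0, true) := by
              simp [stepB, hc, h, hcond]
              have h2 := hcond.2
              rw [List.getD_eq_getElem _ _ hcond.1] at h2
              exact h2
            rw [List.foldl_cons, hstep, ih (i + 1) 0 (by omega)]
            rw [decide_eq_decide]
            simp only [groupsAux, hc, if_true, if_neg h, List.map_cons]
            rw [drop_cons_iff]
            constructor
            · intro h3; exact ⟨hcond.1, hcond.2, h3⟩
            · rintro ⟨_, _, h3⟩; exact h3
          · have hstep : stepB infor (i, run, true) c = (i + 1, 0, false) := by
              simp only [stepB, hc, if_true, h, ne_eq, not_false_eq_true, if_neg hcond]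
            rw [List.foldl_cons, hstep, foldB_false]
            rw [eq_comm, decide_eq_false_iff_not]
            simp only [groupsAux, hc, if_true, if_neg h, List.map_cons]
            rw [drop_cons_iff]
            rintro ⟨h1, h2, _⟩; exact hcond ⟨h1, h2⟩
      · have hstep : stepB infor (i, run, true) c = (i, run + 1, true) := by
          simp [stepB, hc]
        rw [List.foldl_cons, hstep, ih i (run + 1) hi]
        simp [groupsAux, hc]

theorem alt_eq_decide (arr : String) (infor : List Int) :
    check_arrangement_alt arr infor
      = decide (infor = (groupsAux 0 arr.toList).map Int.ofNat) := by
  unfold check_arrangement_alt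
  simpa using foldB_true infor arr.toList 0 0 (Nat.zero_le _)

-- ===== VERDICT (by name: the statement is the Claim_ definition above) =====
theorem check_arrangement_spec : Claim_equal_check_arrangement := by
  intro arr infor _
  unfold Spec_check_arrangement
  rw [check_arrangement_eq_decide, alt_eq_decide]
  have := filter_splitD arr.toList []
  simp only [List.length_nil] at this
  rw [this]
  simp [eq_comm]
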